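-- pv_equiv track=rewrite | github.com/Vivek09Chahal/AdventOfCode | Python/1st.py | part2
-- ===== SOURCE A (Python) =====
-- def part2(left_list, right_list):
--     count_map = {}
--     for num in right_list:
--         if num in count_map:
--             count_map[num] += 1
--         else:
--             count_map[num] = 1
--
--     # Calculate the similarity score
--     similarity_score = 0
--     for num in left_list:
--         similarity_score += num * count_map.get(num, 0)
--     return similarity_score
-- ===== SOURCE B (Python) =====
-- def part2(left_list, right_list):
--     # Sort both lists once, then sweep them together with a merge-style
--     # two-pointer walk: for each left value, advance past smaller right
--     # values and count the run of equal ones.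
--     ls = sorted(left_list)
--     rs = sorted(right_list)
--     total = 0
--     j = 0
--     n = len(rs)
--     for v in ls:
--         while j < n and rs[j] < v:
--             j += 1
--         c = 0
--         while j + c < n and rs[j + c] == v:
--             c += 1
--         total += v * c
--     return total
-- ===== Notes on version B (the rewrite author's own statement) =====
-- stated objective: alternative
-- what changed: Replaced the hash-count dictionary plus lookup pass with sorting both lists once and a merge-style two-pointer sweep that counts each left value's run of equal right values in order.
import Mathlib
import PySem

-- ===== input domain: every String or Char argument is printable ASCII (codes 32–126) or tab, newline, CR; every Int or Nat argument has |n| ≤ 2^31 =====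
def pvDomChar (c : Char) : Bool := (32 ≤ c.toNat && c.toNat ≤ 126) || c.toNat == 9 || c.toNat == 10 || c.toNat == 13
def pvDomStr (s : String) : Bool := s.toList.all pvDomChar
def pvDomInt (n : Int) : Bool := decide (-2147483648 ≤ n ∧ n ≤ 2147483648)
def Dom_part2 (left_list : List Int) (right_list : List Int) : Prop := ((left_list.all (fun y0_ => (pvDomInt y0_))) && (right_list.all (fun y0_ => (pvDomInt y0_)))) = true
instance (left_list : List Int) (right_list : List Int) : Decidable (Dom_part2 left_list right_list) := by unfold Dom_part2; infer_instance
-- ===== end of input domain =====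

-- B replaces A's hash-count dictionary with a sort-both-lists two-pointer merge sweep (alternative algorithm, O((n+m) log(n+m))).


-- ===== PORT A =====
def part2 (left_list : List Int) (right_list : List Int) : Int :=
  let count_map : PySem.Dict Int Int :=
    right_list.foldl (fun d num =>
      if d.contains num then d.insert num (d.getD num 0 + 1)
      else d.insert num 1) PySem.Dict.empty
  left_list.foldl (fun similarity_score num =>
    similarity_score + num * count_map.getD num 0) 0

-- ===== PORT B =====
-- two-pointer merge over the two sorted lists; the advancing index j is
-- represented by the remaining suffix of rs (state = (total, suffix)).
def part2_alt (left_list : List Int) (right_list : List Int) : Int :=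
  let ls := PySem.List.sorted left_list (fun x => x) false
  let rs := PySem.List.sorted right_list (fun x => x) false
  (ls.foldl (fun (st : Int × List Int) v =>
      let R2 := st.2.dropWhile (fun r => decide (r < v))        -- while rs[j] < v: j += 1
      let c := (R2.takeWhile (fun r => r == v)).length          -- while rs[j+c] == v: c += 1
      (st.1 + v * (c : Int), R2)) (0, rs)).1

-- ===== PRECONDITION & SPEC =====
def Spec_part2 (left_list : List Int) (right_list : List Int) (out : Int) : Prop := out = part2_alt left_list right_list
instance (left_list : List Int) (right_list : List Int) (out : Int) : Decidable (Spec_part2 left_list right_list out) := by unfold Spec_part2; infer_instance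

-- ===== CLAIM (what is proved, stated in full; the proofs are below) =====
def Claim_equal_part2 : Prop := ∀ (left_list : List Int) (right_list : List Int), Dom_part2 left_list right_list → Spec_part2 left_list right_list (part2 left_list right_list)

-- ===== LEMMAS AND PROOFS =====

-- A's branching counting loop is the standard insert-getD counting loop (the branches coincide).
theorem part2_count_loop_eq (right_list : List Int) (d : PySem.Dict Int Int) :
    right_list.foldl (fun d num =>
      if d.contains num then d.insert num (d.getD num 0 + 1)
      else d.insert num 1) d
    = right_list.foldl (fun d num => d.insert num (d.getD num 0 + 1)) d := by
  induction right_list generalizing d with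
  | nil => rfl
  | cons num rest ih =>
    simp only [List.foldl_cons]
    by_cases h : d.contains num = true
    · rw [if_pos h, ih]
    · rw [if_neg h, PySem.Dict.getD_of_not_contains d 0 (by simpa using h), ih]; norm_num

theorem part2_count_map_getD (right_list : List Int) (v : Int) :
    (right_list.foldl (fun d num =>
      if d.contains num then d.insert num (d.getD num 0 + 1)
      else d.insert num 1) PySem.Dict.empty).getD v 0 = (right_list.count v : Int) := by
  rw [part2_count_loop_eq]
  rw [PySem.Dict.getD_foldl_insert_add_one]
  simp [PySem.Dict.getD_empty]

-- In a sorted list whose elements are all ≥ v, the leading run of v's is all the v's.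
theorem takeWhile_len_eq_count (v : Int) (R : List Int)
    (hge : ∀ x ∈ R, v ≤ x) (hp : R.Pairwise (· ≤ ·)) :
    ((R.takeWhile (fun r => r == v)).length : Int) = (R.count v : Int) := by
  induction R with
  | nil => simp
  | cons r R' ih =>
    rcases List.pairwise_cons.mp hp with ⟨hr, hp'⟩
    by_cases h : r = v
    · subst h
      simp only [List.takeWhile_cons, beq_self_eq_true, if_true, List.length_cons,
        List.count_cons_self]
      have := ih (fun x hx => hge x (List.mem_cons_of_mem _ hx)) hp'
      push_cast at this ⊢
      omega
    · have hvr : v < r := lt_of_le_of_ne (hge r (List.mem_cons_self)) (fun e => h e.symm)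
      have hzero : R'.count v = 0 := by
        apply List.count_eq_zero.mpr
        intro hmem
        exact absurd rfl (ne_of_gt (lt_of_lt_of_le hvr (hr v hmem)))
      simp [h, hzero]

-- Dropping the (< v)-prefix of a sorted list then counting the leading run of v's counts all v's.
theorem merge_count (v : Int) (R : List Int) (hp : R.Pairwise (· ≤ ·)) :
    (((R.dropWhile (fun r => decide (r < v))).takeWhile (fun r => r == v)).length : Int)
      = (R.count v : Int) := by
  induction R with
  | nil => simp
  | cons r R' ih =>
    rcases List.pairwise_cons.mp hp with ⟨hr, hp'⟩
    by_cases h : r < v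
    · have hne : ¬(r = v) := ne_of_lt h
      simp [h, hne, ih hp']
    · have hge : ∀ x ∈ r :: R', v ≤ x := by
        intro x hx
        rcases List.mem_cons.mp hx with rfl | hx'
        · omega
        · exact le_trans (by omega) (hr x hx')
      rw [List.dropWhile_cons]
      simp only [h, decide_false, Bool.false_eq_true, if_false]
      exact takeWhile_len_eq_count v (r :: R') hge hp

-- Dropping elements < v does not change the count of any x ≥ v.
theorem dropWhile_count_eq (v x : Int) (R : List Int) (hvx : v ≤ x) :
    (R.dropWhile (fun r => decide (r < v))).count x = R.count x := by
  induction R with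
  | nil => rfl
  | cons r R' ih =>
    by_cases h : r < v
    · have hne : ¬(r = x) := by omega
      simp [h, hne, ih]
    · simp [h]

-- The merge sweep computes the weighted-count sum, for sorted L and sorted R.
theorem merge_loop (L : List Int) (R : List Int) (t : Int)
    (hL : L.Pairwise (· ≤ ·)) (hR : R.Pairwise (· ≤ ·)) :
    (L.foldl (fun (st : Int × List Int) v =>
        let R2 := st.2.dropWhile (fun r => decide (r < v))
        let c := (R2.takeWhile (fun r => r == v)).length
        (st.1 + v * (c : Int), R2)) (t, R)).1
      = t + (L.map (fun v => v * (R.count v : Int))).sum := by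
  induction L generalizing R t with
  | nil => simp
  | cons v L' ih =>
    rcases List.pairwise_cons.mp hL with ⟨hv, hL'⟩
    simp only [List.foldl_cons, List.map_cons, List.sum_cons]
    have hR2 : (R.dropWhile (fun r => decide (r < v))).Pairwise (· ≤ ·) :=
      hR.sublist (List.dropWhile_sublist _)
    rw [ih _ _ hL' hR2, merge_count v R hR]
    have hmap : L'.map (fun l => l * (((R.dropWhile (fun r => decide (r < v))).count l : Nat) : Int))
        = L'.map (fun l => l * (R.count l : Int)) := by
      apply List.map_congr_left
      intro l hl
      rw [dropWhile_count_eq v l R (hv l hl)]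
    rw [hmap]; ring

-- ===== VERDICT (by name: the statement is the Claim_ definition above) =====
theorem part2_spec : Claim_equal_part2 := by
  intro left_list right_list _
  unfold Spec_part2 part2 part2_alt
  show left_list.foldl (fun similarity_score num =>
      similarity_score + num * ((right_list.foldl (fun d num =>
        if d.contains num then d.insert num (d.getD num 0 + 1)
        else d.insert num 1) PySem.Dict.empty).getD num 0)) 0 = _
  rw [PySem.List.foldl_add]
  simp only [part2_count_map_getD]
  rw [merge_loop _ _ _ (PySem.List.sorted_pairwise _ _) (PySem.List.sorted_pairwise _ _)]
  have hperm : (PySem.List.sorted left_list (fun x => x) false).Perm left_list :=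
    PySem.List.sorted_perm _ _ _
  have hcnt : ∀ v : Int,
      (PySem.List.sorted right_list (fun x => x) false).count v = right_list.count v :=
    fun v => (PySem.List.sorted_perm right_list (fun x => x) false).count_eq v
  have hmap : (PySem.List.sorted left_list (fun x => x) false).map
        (fun v => v * (((PySem.List.sorted right_list (fun x => x) false).count v : Nat) : Int))
      = (PySem.List.sorted left_list (fun x => x) false).map
        (fun v => v * (right_list.count v : Int)) := by
    apply List.map_congr_left; intro l _; rw [hcnt]
  rw [hmap, (hperm.map _).sum_eq]
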